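-- pv_equiv track=rewrite | github.com/dhasday/advent-of-code | src/main/python/aoc/dec2019/day16.py | _iterate_sum_remaining
-- ===== SOURCE A (Python) =====
-- def _iterate_sum_remaining(values):
--     num_values = len(values)
--
--     s = sum(values)
--     output = []
--     for i in range(num_values):
--         output.append(abs(s) % 10)
--         s -= values[i]
--     return output
-- ===== SOURCE B (Python) =====
-- from itertools import accumulate
--
--
-- def _iterate_sum_remaining(values):
--     suffix = list(accumulate(reversed(values)))
--     return [abs(x) % 10 for x in reversed(suffix)]
-- ===== Notes on version B (the rewrite author's own statement) =====
-- stated objective: alternative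
-- what changed: Instead of mutating a single running total inside an index loop that appends one digit per step, B materialises the whole suffix-sum table with itertools.accumulate over the reversed list and then maps abs(x)%10 over it in a separate pass.
import Mathlib
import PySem

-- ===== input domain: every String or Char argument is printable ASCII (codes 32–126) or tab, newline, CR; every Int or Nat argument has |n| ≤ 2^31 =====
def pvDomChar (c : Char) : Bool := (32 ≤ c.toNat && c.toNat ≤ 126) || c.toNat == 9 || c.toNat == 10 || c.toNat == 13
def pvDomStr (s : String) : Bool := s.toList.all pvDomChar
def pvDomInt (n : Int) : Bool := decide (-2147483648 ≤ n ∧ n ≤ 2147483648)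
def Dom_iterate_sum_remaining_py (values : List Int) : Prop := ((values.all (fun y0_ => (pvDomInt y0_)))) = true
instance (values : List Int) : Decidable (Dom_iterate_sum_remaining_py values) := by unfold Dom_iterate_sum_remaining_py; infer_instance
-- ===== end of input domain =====

-- B replaces A's in-place subtract-from-total index loop by building the whole suffix-sum
-- table (accumulate over the reversed list) and mapping abs%10 over it in a second pass;
-- objective: alternative decomposition, same cost.
-- ===== PORT A =====
-- the for-loop over range(len(values)) reads values[i] in order; ported as structural
-- recursion consuming values in order with the same (s, output) state (exact: i is always in range)
def pvALoop (s : Int) (rest : List Int) (out : List Int) : List Int :=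
  match rest with
  | [] => out
  | v :: vs => pvALoop (s - v) vs (out ++ [|s| % 10])

def iterate_sum_remaining_py (values : List Int) : List Int :=
  pvALoop values.sum values []

-- ===== PORT B =====
-- itertools.accumulate (running sum) ported as this recursion
def pvAccum (s : Int) : List Int → List Int
  | [] => []
  | x :: xs => (s + x) :: pvAccum (s + x) xs

def iterate_sum_remaining_py_alt (values : List Int) : List Int :=
  let suffix := pvAccum 0 values.reverse
  suffix.reverse.map (fun x => |x| % 10)

-- ===== PRECONDITION & SPEC =====
def Spec_iterate_sum_remaining_py (values : List Int) (out : List Int) : Prop := out = iterate_sum_remaining_py_alt values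
instance (values : List Int) (out : List Int) : Decidable (Spec_iterate_sum_remaining_py values out) := by unfold Spec_iterate_sum_remaining_py; infer_instance

-- ===== CLAIM (what is proved, stated in full; the proofs are below) =====
def Claim_equal_iterate_sum_remaining_py : Prop := ∀ (values : List Int), Dom_iterate_sum_remaining_py values → Spec_iterate_sum_remaining_py values (iterate_sum_remaining_py values)

-- ===== LEMMAS AND PROOFS =====

-- ===== VERDICT (by name: the statement is the Claim_ definition above) =====
lemma pvALoop_out (s : Int) (l out : List Int) :
    pvALoop s l out = out ++ pvALoop s l [] := by
  induction l generalizing s out with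
  | nil => simp [pvALoop]
  | cons v vs ih =>
      rw [pvALoop, pvALoop, ih (s - v) (out ++ [|s| % 10]), ih (s - v) ([] ++ [|s| % 10])]
      simp

lemma pvAccum_append (s x : Int) (ys : List Int) :
    pvAccum s (ys ++ [x]) = pvAccum s ys ++ [s + ys.sum + x] := by
  induction ys generalizing s with
  | nil => simp [pvAccum]
  | cons y ys ih =>
      simp only [List.cons_append, pvAccum, ih (s + y), List.sum_cons]
      ring_nf

lemma alt_cons (v : Int) (vs : List Int) :
    iterate_sum_remaining_py_alt (v :: vs) =
      (|v + vs.sum| % 10) :: iterate_sum_remaining_py_alt vs := by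
  simp only [iterate_sum_remaining_py_alt, List.reverse_cons, pvAccum_append]
  simp [add_comm]

lemma A_cons (v : Int) (vs : List Int) :
    iterate_sum_remaining_py (v :: vs) =
      (|v + vs.sum| % 10) :: iterate_sum_remaining_py vs := by
  simp only [iterate_sum_remaining_py, List.sum_cons, pvALoop]
  rw [pvALoop_out]
  simp

lemma ports_agree (values : List Int) :
    iterate_sum_remaining_py values = iterate_sum_remaining_py_alt values := by
  induction values with
  | nil => rfl
  | cons v vs ih => rw [A_cons, alt_cons, ih]

theorem iterate_sum_remaining_py_spec : Claim_equal_iterate_sum_remaining_py := by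
  intro values _
  exact ports_agree values
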